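-- pv_equiv track=rewrite | github.com/alexandragushchina-d/db_checker | src/json_serializer.py | _escape_json_string
-- ===== SOURCE A (Python) =====
-- def _escape_json_string(raw_str) :
--   result = ""
--   index = 0
--   begin_index = 0
--   for char in raw_str :
--     escaped = None
--     if char == '\b' :
--       escaped = "\\b"
--     elif char == '\f' :
--       escaped = "\\f"
--     elif char == '\n' :
--       escaped = "\\n"
--     elif char == '\r' :
--       escaped = "\\r"
--     elif char == '\t' :
--       escaped = "\\t"
--     elif char == '\\' :
--       escaped = "\\\\"
--     elif char == '\"' :
--       escaped = "\\\""
--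
--     if escaped is not None :
--       result += raw_str[begin_index : index]
--       result += escaped
--       begin_index = index + 1
--
--     index += 1
--
--   result += raw_str[begin_index :]
--   return result
-- ===== SOURCE B (Python) =====
-- _ESCAPE_TABLE = str.maketrans({
--     '\b': '\\b',
--     '\f': '\\f',
--     '\n': '\\n',
--     '\r': '\\r',
--     '\t': '\\t',
--     '\\': '\\\\',
--     '"': '\\"',
-- })
--
-- def _escape_json_string(raw_str):
--     return raw_str.translate(_ESCAPE_TABLE)
-- ===== Notes on version B (the rewrite author's own statement) =====
-- stated objective: idiomatic
-- what changed: Replaced the manual index/begin_index segment-flushing scan with a precomputed str.maketrans table applied by a single str.translate call.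
import Mathlib
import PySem

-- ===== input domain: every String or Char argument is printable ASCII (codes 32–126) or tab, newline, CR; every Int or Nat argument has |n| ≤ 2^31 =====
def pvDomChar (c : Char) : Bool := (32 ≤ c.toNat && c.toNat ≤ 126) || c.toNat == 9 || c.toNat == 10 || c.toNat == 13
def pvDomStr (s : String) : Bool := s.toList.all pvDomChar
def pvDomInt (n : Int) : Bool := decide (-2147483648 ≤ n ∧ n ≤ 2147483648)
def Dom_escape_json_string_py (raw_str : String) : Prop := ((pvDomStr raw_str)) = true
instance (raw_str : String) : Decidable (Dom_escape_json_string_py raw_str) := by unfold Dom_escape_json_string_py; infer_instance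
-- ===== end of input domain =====

-- B replaces A's index/begin_index segment-flushing scan by a precomputed translation
-- table applied in one per-character pass (Python: str.maketrans + str.translate); idiomatic, same cost.

-- ===== PORT A =====
-- the if/elif chain computing `escaped` for one character
def escapedA (c : Char) : Option String :=
  if c = '\x08' then some "\\b"
  else if c = '\x0c' then some "\\f"
  else if c = '\n' then some "\\n"
  else if c = '\r' then some "\\r"
  else if c = '\t' then some "\\t"
  else if c = '\\' then some "\\\\"
  else if c = '\"' then some "\\\"" else none

-- A's for-loop: state (index, begin_index, result); after the loop, result += raw_str[begin_index:]
def escA_loop (full : List Char) : List Char → Nat → Nat → String → String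
  | [], _, b, res => res ++ String.ofList (PySem.List.slice full (some (b : Int)) none)
  | c :: rest, i, b, res =>
    match escapedA c with
    | some e =>
        escA_loop full rest (i+1) (i+1)
          (res ++ String.ofList (PySem.List.slice full (some (b : Int)) (some (i : Int))) ++ e)
    | none => escA_loop full rest (i+1) b res

def escape_json_string_py (raw_str : String) : String :=
  escA_loop raw_str.toList raw_str.toList 0 0 ""

-- ===== PORT B =====
-- the translation table built once (str.maketrans)
def escTable : List (Char × String) :=
  [('\x08', "\\b"), ('\x0c', "\\f"), ('\n', "\\n"), ('\r', "\\r"),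
   ('\t', "\\t"), ('\\', "\\\\"), ('\"', "\\\"")]

-- raw_str.translate(table): one pass mapping each character through the table
def escape_json_string_py_alt (raw_str : String) : String :=
  String.ofList (raw_str.toList.flatMap (fun c =>
    match escTable.lookup c with
    | some e => e.toList
    | none => [c]))

-- ===== PRECONDITION & SPEC =====
def Spec_escape_json_string_py (raw_str : String) (out : String) : Prop := out = escape_json_string_py_alt raw_str
instance (raw_str : String) (out : String) : Decidable (Spec_escape_json_string_py raw_str out) := by unfold Spec_escape_json_string_py; infer_instance

-- ===== CLAIM (what is proved, stated in full; the proofs are below) =====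
def Claim_equal_escape_json_string_py : Prop := ∀ (raw_str : String), Dom_escape_json_string_py raw_str → Spec_escape_json_string_py raw_str (escape_json_string_py raw_str)

-- ===== LEMMAS AND PROOFS =====

-- B's per-character translation
def trB (c : Char) : List Char :=
  match escTable.lookup c with
  | some e => e.toList
  | none => [c]

theorem trB_eq (c : Char) :
    trB c = (match escapedA c with | some e => e.toList | none => [c]) := by
  simp only [trB, escTable, escapedA, List.lookup]
  split_ifs with h1 h2 h3 h4 h5 h6 h7 <;> simp_all
  simp [beq_eq_false_iff_ne.mpr h1, beq_eq_false_iff_ne.mpr h2, beq_eq_false_iff_ne.mpr h3,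
        beq_eq_false_iff_ne.mpr h4, beq_eq_false_iff_ne.mpr h5, beq_eq_false_iff_ne.mpr h6,
        beq_eq_false_iff_ne.mpr h7]

theorem trB_of_none {c : Char} (h : escapedA c = none) : trB c = [c] := by
  rw [trB_eq, h]

theorem trB_of_some {c : Char} {e : String} (h : escapedA c = some e) : trB c = e.toList := by
  rw [trB_eq, h]

theorem escA_loop_inv (full : List Char) (cs : List Char) :
    ∀ (pre : List Char) (res : String) (b : Nat),
      full = pre ++ cs → b ≤ pre.length →
      res.toList ++ (full.drop b).take (pre.length - b) = (full.take pre.length).flatMap trB →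
      (escA_loop full cs pre.length b res).toList = full.flatMap trB := by
  induction cs with
  | nil =>
    intro pre res b hfull hb hinv
    subst hfull
    simp only [List.append_nil] at *
    simp only [escA_loop, PySem.List.slice_from_natCast]
    rw [String.toList_append, String.toList_ofList]
    have htk : (pre.drop b).take (pre.length - b) = pre.drop b :=
      List.take_of_length_le (by simp)
    rw [htk, List.take_length] at hinv
    exact hinv
  | cons c rest ih =>
    intro pre res b hfull hb hinv
    have hget : full[pre.length]? = some c := by
      subst hfull; simp
    have hpre : full = (pre ++ [c]) ++ rest := by simp [hfull]
    have hlen : (pre ++ [c]).length = pre.length + 1 := by simp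
    cases hesc : escapedA c with
    | some e =>
      simp only [escA_loop, hesc]
      have := ih (pre ++ [c])
        (res ++ String.ofList (PySem.List.slice full (some (b : Int)) (some (pre.length : Int))) ++ e)
        (pre.length + 1) hpre (by simp)
      rw [hlen] at this
      apply this
      · -- invariant for the recursive call
        rw [PySem.List.slice_natCast]
        simp only [Nat.sub_self, List.take_zero, List.append_nil]
        rw [String.toList_append, String.toList_append, String.toList_ofList]
        have htake : full.take (pre.length + 1) = full.take pre.length ++ [c] := by
          rw [List.take_add_one, hget]; rfl
        rw [htake, List.flatMap_append, ← hinv]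
        simp [trB_of_some hesc, List.flatMap_cons]
    | none =>
      simp only [escA_loop, hesc]
      have := ih (pre ++ [c]) res b hpre (by simp; omega)
      rw [hlen] at this
      apply this
      · have htake : full.take (pre.length + 1) = full.take pre.length ++ [c] := by
          rw [List.take_add_one, hget]; rfl
        have hdropget : (full.drop b)[pre.length - b]? = some c := by
          rw [List.getElem?_drop]; rw [← hget]; congr 1; omega
        have : pre.length + 1 - b = (pre.length - b) + 1 := by omega
        rw [this, List.take_add_one, hdropget, htake, List.flatMap_append, ← hinv]
        simp [trB_of_none hesc, List.flatMap_cons]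

theorem escape_toList (s : String) :
    (escape_json_string_py s).toList = s.toList.flatMap trB := by
  unfold escape_json_string_py
  exact escA_loop_inv s.toList s.toList [] "" 0 rfl (by simp) (by simp)

-- ===== VERDICT (by name: the statement is the Claim_ definition above) =====
theorem escape_json_string_py_spec : Claim_equal_escape_json_string_py := by
  intro s _
  unfold Spec_escape_json_string_py escape_json_string_py_alt
  have h := escape_toList s
  have : escape_json_string_py s = String.ofList ((escape_json_string_py s).toList) := by
    simp
  rw [this, h]
  rfl
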